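-- pv_equiv track=rewrite | github.com/TheoBa/led | wanadoz_library.py | circle_to_pos
-- ===== SOURCE A (Python) =====
-- def px_to_pos(px):
--     x = px[0]
--     y = px[1]
--     pos = y*24
--     if y%2==0:
--         pos += x
--     else:
--         pos += 23 - x
--     return pos
--
-- def circle_to_pos(n): # n is an int corresponding to the circle
--     l_px = []
--     if n>=0 and n<9:
--         for i in range(n, 24-n):
--             l_px.append([i, n])
--         for j in range(n+1, 17-n):
--             l_px.append([23-n, j])
--         for i in range(n, 24-n):
--             l_px.append([23-i, 17-n])
--         for j in range(n+1, 17-n):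
--             l_px.append([n, 17-j])
--         l_pos = [px_to_pos(px) for px in l_px]
--         return l_pos
--     else:
--         return []
-- ===== SOURCE B (Python) =====
-- def circle_to_pos(n):
--     # Walk the ring boundary once as a clockwise turtle instead of four range loops.
--     if n < 0 or n >= 9:
--         return []
--     out = []
--     x, y = n, n
--     dx, dy = 1, 0
--     lo, hx, hy = n, 23 - n, 17 - n
--     for _ in range(80 - 8 * n):
--         out.append(y * 24 + (x if y % 2 == 0 else 23 - x))
--         if not (lo <= x + dx <= hx and lo <= y + dy <= hy):
--             dx, dy = -dy, dx
--         x, y = x + dx, y + dy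
--     return out
-- ===== Notes on version B (the rewrite author's own statement) =====
-- stated objective: alternative
-- what changed: Replaces A's four explicit range loops building a pixel list plus a mapping pass with a single clockwise turtle walk over the ring boundary (position + direction state, turning at corners) that emits each serpentine index directly.
import Mathlib
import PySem

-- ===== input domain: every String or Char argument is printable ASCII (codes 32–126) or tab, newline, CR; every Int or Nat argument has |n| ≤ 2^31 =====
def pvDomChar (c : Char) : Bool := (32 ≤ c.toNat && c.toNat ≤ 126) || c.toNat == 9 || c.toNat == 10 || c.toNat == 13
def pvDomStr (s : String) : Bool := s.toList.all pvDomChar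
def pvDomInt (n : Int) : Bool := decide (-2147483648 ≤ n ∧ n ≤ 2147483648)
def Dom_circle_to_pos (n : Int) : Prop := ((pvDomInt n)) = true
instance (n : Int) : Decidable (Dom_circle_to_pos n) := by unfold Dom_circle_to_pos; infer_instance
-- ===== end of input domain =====

-- B replaces A's four explicit range loops + mapping pass with one clockwise turtle
-- walk over the ring boundary that emits each serpentine index directly (objective:
-- alternative — same order, same values, one incremental traversal).

-- ===== PORT A =====
-- px is always a two-element list [x, y] in A; ported as a pair (exact on such lists).
def px_to_pos (px : Int × Int) : Int :=
  let x := px.1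
  let y := px.2
  let pos := y * 24
  if PySem.Int.mod y 2 == 0 then pos + x else pos + (23 - x)

def circle_to_pos (n : Int) : List Int :=
  if n ≥ 0 ∧ n < 9 then
    let l_px : List (Int × Int) := []
    let l_px := (PySem.List.pyRange n (24 - n) 1).foldl (fun l i => l ++ [(i, n)]) l_px
    let l_px := (PySem.List.pyRange (n + 1) (17 - n) 1).foldl (fun l j => l ++ [(23 - n, j)]) l_px
    let l_px := (PySem.List.pyRange n (24 - n) 1).foldl (fun l i => l ++ [(23 - i, 17 - n)]) l_px
    let l_px := (PySem.List.pyRange (n + 1) (17 - n) 1).foldl (fun l j => l ++ [(n, 17 - j)]) l_px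
    l_px.map px_to_pos
  else []

-- ===== PORT B =====
def circle_to_pos_alt (n : Int) : List Int :=
  if n < 0 ∨ n ≥ 9 then []
  else
    let lo := n
    let hx := 23 - n
    let hy := 17 - n
    let st := (PySem.List.pyRange 0 (80 - 8 * n) 1).foldl
      (fun (st : List Int × Int × Int × Int × Int) _ =>
        let (out, x, y, dx, dy) := st
        let out := out ++ [y * 24 + (if PySem.Int.mod y 2 == 0 then x else 23 - x)]
        let (dx, dy) :=
          if ¬ (lo ≤ x + dx ∧ x + dx ≤ hx ∧ lo ≤ y + dy ∧ y + dy ≤ hy) then (-dy, dx)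
          else (dx, dy)
        (out, x + dx, y + dy, dx, dy))
      ([], n, n, 1, 0)
    st.1

-- ===== PRECONDITION & SPEC =====
def Spec_circle_to_pos (n : Int) (out : List Int) : Prop := out = circle_to_pos_alt n
instance (n : Int) (out : List Int) : Decidable (Spec_circle_to_pos n out) := by unfold Spec_circle_to_pos; infer_instance

-- ===== CLAIM (what is proved, stated in full; the proofs are below) =====
def Claim_equal_circle_to_pos : Prop := ∀ (n : Int), Dom_circle_to_pos n → Spec_circle_to_pos n (circle_to_pos n)

-- ===== LEMMAS AND PROOFS =====

-- ===== VERDICT (by name: the statement is the Claim_ definition above) =====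
theorem circle_to_pos_spec : Claim_equal_circle_to_pos := by
  intro n _
  unfold Spec_circle_to_pos
  by_cases h : 0 ≤ n ∧ n < 9
  · obtain ⟨h1, h2⟩ := h
    interval_cases n <;> decide
  · unfold circle_to_pos circle_to_pos_alt
    rw [if_neg (by omega), if_pos (by omega)]
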